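-- pv_equiv track=rewrite | github.com/An-jisu/Algorithm | 프로그래머스/lv1/72410. 신규 아이디 추천/신규 아이디 추천.py | solution
-- ===== SOURCE A (Python) =====
-- def solution(new_id):
--     answer = ''
--     #1단계
--     new_id = new_id.lower()
--     #2단계
--     for i in new_id:
--         if not(i=='-' or i=='_' or i=='.' or i.isalpha() or i.isdigit()):
--             new_id=new_id.replace(i,'')
--
--     #3단계
--     for i in new_id:
--         if answer[-1:]=='.' and i=='.':
--             continue
--         answer+=i
--     #4단계
--     if answer[:1]=='.':
--         answer = answer[1:]
--     if answer[-1:]=='.':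
--         answer = answer[:-1]
--     #5단계
--     if len(answer)==0:
--         answer+='a'
--     #6단계
--     if len(answer)>=16:
--         answer = answer[:15]
--         if answer[-1:]=='.':
--             answer = answer[:-1]
--     #7단계
--     if len(answer)<=2:
--         while len(answer)<3:
--             answer+=answer[-1]
--     return answer
-- ===== SOURCE B (Python) =====
-- def solution(new_id):
--     # one fused state-machine pass: lower, filter, collapse dots and drop leading dots together
--     out = []
--     last = None
--     for ch in new_id:
--         c = ch.lower()
--         if c.isalnum() or c == '-' or c == '_':
--             out.append(c)
--             last = c
--         elif c == '.' and last is not None and last != '.':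
--             out.append('.')
--             last = '.'
--     if out and out[-1] == '.':
--         out.pop()
--     t = ''.join(out)
--     if not t:
--         t = 'a'
--     if len(t) >= 16:
--         t = t[:15]
--         if t[-1] == '.':
--             t = t[:-1]
--     if len(t) < 3:
--         t += t[-1] * (3 - len(t))
--     return t
-- ===== Notes on version B (the rewrite author's own statement) =====
-- stated objective: alternative
-- what changed: A's four staged scans (repeated str.replace removal, a dot-tracking append loop, and two edge-dot conditionals) are fused into one state-machine pass that lowers, filters, collapses dots and drops leading dots together, with the padding while-loop replaced by arithmetic replication.
import Mathlib
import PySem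

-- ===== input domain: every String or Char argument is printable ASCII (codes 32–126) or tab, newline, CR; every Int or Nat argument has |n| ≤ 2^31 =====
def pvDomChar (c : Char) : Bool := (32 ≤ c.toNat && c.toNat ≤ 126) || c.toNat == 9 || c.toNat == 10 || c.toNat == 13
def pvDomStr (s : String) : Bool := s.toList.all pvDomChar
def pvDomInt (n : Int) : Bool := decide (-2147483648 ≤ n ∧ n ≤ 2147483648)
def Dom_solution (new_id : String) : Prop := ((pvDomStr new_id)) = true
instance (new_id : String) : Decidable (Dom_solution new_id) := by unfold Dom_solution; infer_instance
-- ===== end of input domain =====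

-- B fuses A's four staged scans (repeated str.replace removal, the dot-tracking append loop,
-- and the two edge-dot strips) into one state-machine pass that lowers, filters, collapses dots
-- and drops leading dots together, and replaces the padding while-loop by arithmetic replication.

-- ===== PORT A =====
-- step 7 while-loop: append the last character until length 3 (length grows, so it terminates);
-- the 'none' branch is Python's IndexError on answer[-1], unreachable because step 5 makes answer nonempty
def pvAWhile (ans : List Char) : List Char :=
  if _h : ans.length < 3 then
    match PySem.List.pyGet? ans (-1) with
    | some c => pvAWhile (ans ++ [c])
    | none => ans
  else ans
termination_by 3 - ans.length
decreasing_by simp; omega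

def solution (new_id : String) : String :=
  let answer : List Char := []
  -- step 1
  let nid := PySem.Chars.lower new_id.toList
  -- step 2
  let nid := nid.foldl (fun cur i =>
      if ¬(i = '-' ∨ i = '_' ∨ i = '.' ∨ PySem.Chars.isalpha i = true ∨ PySem.Chars.isdigit i = true)
      then PySem.Chars.replace cur [i] [] else cur) nid
  -- step 3
  let answer := nid.foldl (fun ans i =>
      if PySem.List.slice ans (some (-1)) none = ['.'] ∧ i = '.' then ans else ans ++ [i]) answer
  -- step 4
  let answer := if PySem.List.slice answer none (some 1) = ['.']
                then PySem.List.slice answer (some 1) none else answer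
  let answer := if PySem.List.slice answer (some (-1)) none = ['.']
                then PySem.List.slice answer none (some (-1)) else answer
  -- step 5
  let answer := if answer.length = 0 then answer ++ ['a'] else answer
  -- step 6
  let answer := if answer.length ≥ 16 then
      let a := PySem.List.slice answer none (some 15)
      if PySem.List.slice a (some (-1)) none = ['.'] then PySem.List.slice a none (some (-1)) else a
    else answer
  -- step 7
  String.ofList (pvAWhile answer)

-- ===== PORT B =====
def solution_alt (new_id : String) : String :=
  -- the fused pass: state = (out, last); last is None (no kept char yet) or the last kept char
  let st := new_id.toList.foldl (fun (st : List Char × Option Char) ch =>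
      let c := PySem.Chars.lowerChar ch
      if PySem.Chars.isalnum c || c = '-' || c = '_' then (st.1 ++ [c], some c)
      else if c = '.' ∧ st.2 ≠ none ∧ st.2 ≠ some '.' then (st.1 ++ ['.'], some '.')
      else st) ([], none)
  let out := if st.1 ≠ [] ∧ PySem.List.pyGet? st.1 (-1) = some '.' then st.1.dropLast else st.1
  let t := if out = [] then ['a'] else out
  let t := if 16 ≤ t.length then
      let a := PySem.List.slice t none (some 15)
      -- t[-1] raises on empty t; unreachable here (a has length 15), hence the getD-free match below
      if PySem.List.pyGet? a (-1) = some '.' then PySem.List.slice a none (some (-1)) else a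
    else t
  let t := if t.length < 3 then
      t ++ List.replicate (3 - t.length) ((PySem.List.pyGet? t (-1)).getD 'a')
    else t
  String.ofList t

-- ===== PRECONDITION & SPEC =====
def Spec_solution (new_id : String) (out : String) : Prop := out = solution_alt new_id
instance (new_id : String) (out : String) : Decidable (Spec_solution new_id out) := by unfold Spec_solution; infer_instance

-- ===== CLAIM (what is proved, stated in full; the proofs are below) =====
def Claim_equal_solution : Prop := ∀ (new_id : String), Dom_solution new_id → Spec_solution new_id (solution new_id)

-- ===== LEMMAS AND PROOFS =====

def pvValid (c : Char) : Bool := c = '-' || c = '_' || c = '.' || PySem.Chars.isalpha c || PySem.Chars.isdigit c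

def pvCollapse : Option Char → List Char → List Char
  | _, [] => []
  | p, c :: l => if p = some '.' ∧ c = '.' then pvCollapse p l else c :: pvCollapse (some c) l

theorem pv_replace_go (c : Char) :
    ∀ (fuel : Nat) (l acc : List Char), l.length ≤ fuel →
      PySem.Chars.replace.go [c] [] fuel l acc = acc.reverse ++ l.filter (· ≠ c) := by
  intro fuel
  induction fuel with
  | zero => intro l acc h; rw [List.length_eq_zero_iff.mp (Nat.le_zero.mp h)]
            simp [PySem.Chars.replace.go]
  | succ n ih =>
    intro l acc h
    cases l with
    | nil => simp [PySem.Chars.replace.go]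
    | cons c' t =>
      rw [PySem.Chars.replace.go]
      by_cases hc : c = c'
      · subst hc
        simp [List.isPrefixOf]
        rw [ih t acc (by simpa using h)]
        simp
      · simp [List.isPrefixOf, hc]
        rw [ih t (c' :: acc) (by simpa using h)]
        simp [Ne.symm hc]

theorem pv_replace_del (s : List Char) (c : Char) :
    PySem.Chars.replace s [c] [] = s.filter (· ≠ c) := by
  rw [PySem.Chars.replace]
  simp [pv_replace_go c s.length s [] (le_refl _)]

theorem pvValid_iff (c : Char) :
    pvValid c = true ↔ (c = '-' ∨ c = '_' ∨ c = '.' ∨ PySem.Chars.isalpha c = true ∨ PySem.Chars.isdigit c = true) := by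
  simp [pvValid]; tauto

theorem pv_foldRem : ∀ (l s : List Char),
    l.foldl (fun cur i =>
      if ¬(i = '-' ∨ i = '_' ∨ i = '.' ∨ PySem.Chars.isalpha i = true ∨ PySem.Chars.isdigit i = true)
      then PySem.Chars.replace cur [i] [] else cur) s
    = s.filter (fun x => pvValid x || !(l.contains x)) := by
  intro l
  induction l with
  | nil => intro s; simp
  | cons c t ih =>
    intro s
    simp only [List.foldl_cons]
    by_cases hc : (c = '-' ∨ c = '_' ∨ c = '.' ∨ PySem.Chars.isalpha c = true ∨ PySem.Chars.isdigit c = true)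
    · rw [if_neg (by tauto), ih]
      apply List.filter_congr
      intro x _
      by_cases hx : x = c
      · subst hx
        simp [(pvValid_iff x).mpr hc]
      · simp [hx]
    · rw [if_pos hc, pv_replace_del, ih, List.filter_filter]
      apply List.filter_congr
      intro x _
      by_cases hx : x = c
      · subst hx
        have : pvValid x = false := by
          rw [← Bool.not_eq_true]; intro hv; exact hc ((pvValid_iff x).mp hv)
        simp [this]
      · simp [hx]

theorem pv_foldRem_self (l : List Char) :
    l.foldl (fun cur i =>
      if ¬(i = '-' ∨ i = '_' ∨ i = '.' ∨ PySem.Chars.isalpha i = true ∨ PySem.Chars.isdigit i = true)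
      then PySem.Chars.replace cur [i] [] else cur) l
    = l.filter pvValid := by
  rw [pv_foldRem]
  apply List.filter_congr
  intro x hx
  have hm : l.contains x = true := List.elem_eq_true_of_mem hx
  rw [hm]
  simp

theorem pv_drop_pred (l : List Char) : l.drop (l.length - 1) = l.getLast?.toList := by
  induction l with
  | nil => simp
  | cons c t ih =>
    cases t with
    | nil => simp
    | cons d u =>
      have h1 : (c :: d :: u).length - 1 = (d :: u).length - 1 + 1 := by simp
      rw [h1, List.drop_succ_cons, ih]
      simp

theorem pv_slice_last (l : List Char) :
    PySem.List.slice l (some (-1)) none = ['.'] ↔ l.getLast? = some '.' := by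
  rw [PySem.List.slice_from_neg_one, pv_drop_pred]
  cases l.getLast? <;> simp

theorem pv_take1 (l : List Char) :
    PySem.List.slice l none (some 1) = ['.'] ↔ l.head? = some '.' := by
  rw [PySem.List.slice_to _ (by norm_num)]
  cases l <;> simp [Int.toNat]

theorem pv_foldA : ∀ (l ans : List Char),
    l.foldl (fun ans i =>
      if PySem.List.slice ans (some (-1)) none = ['.'] ∧ i = '.' then ans else ans ++ [i]) ans
    = ans ++ pvCollapse ans.getLast? l := by
  intro l
  induction l with
  | nil => intro ans; simp [pvCollapse]
  | cons c t ih =>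
    intro ans
    simp only [List.foldl_cons, pvCollapse]
    by_cases h : ans.getLast? = some '.' ∧ c = '.'
    · rw [if_pos ⟨(pv_slice_last ans).mpr h.1, h.2⟩, if_pos h, ih]
    · rw [if_neg (fun hh => h ⟨(pv_slice_last ans).mp hh.1, hh.2⟩), if_neg h, ih]
      simp

theorem pv_pyGet_neg_one (l : List Char) (h : l ≠ []) :
    PySem.List.pyGet? l (-1) = l.getLast? := by
  have hl : 0 < l.length := List.length_pos_iff.mpr h
  have : (-(l.length:Int) ≤ -1) := by omega
  simp only [PySem.List.pyGet?, PySem.List.pyIdx?, if_neg (by omega : ¬ (0:Int) ≤ -1), if_pos this]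
  simp only [Option.bind_some]
  rw [List.getLast?_eq_getElem?]
  norm_num

theorem pv_while_aux : ∀ (n : Nat) (t : List Char) (c : Char), t.getLast? = some c → 3 - t.length ≤ n →
    pvAWhile t = t ++ List.replicate (3 - t.length) c := by
  intro n
  induction n with
  | zero =>
    intro t c hc hn
    rw [pvAWhile, dif_neg (by omega)]
    have : 3 - t.length = 0 := by omega
    simp [this]
  | succ m ih =>
    intro t c hc hn
    have ht : t ≠ [] := by intro hh; subst hh; simp at hc
    by_cases h3 : t.length < 3
    · rw [pvAWhile, dif_pos h3, pv_pyGet_neg_one t ht, hc]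
      show pvAWhile (t ++ [c]) = t ++ List.replicate (3 - t.length) c
      rw [ih (t ++ [c]) c (by simp) (by simp; omega)]
      have : 3 - t.length = (3 - (t ++ [c]).length) + 1 := by simp; omega
      rw [this, List.replicate_succ]
      simp
    · rw [pvAWhile, dif_neg h3]
      have : 3 - t.length = 0 := by omega
      simp [this]

theorem pv_while (t : List Char) (c : Char) (h : t.getLast? = some c) :
    pvAWhile t = if t.length < 3 then t ++ List.replicate (3 - t.length) c else t := by
  rw [pv_while_aux 3 t c h (by omega)]
  split_ifs with h3
  · rfl
  · have : 3 - t.length = 0 := by omega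
    simp [this]

-- ---- B's fused pass, characterised ----

-- the pure recursion computed by B's foldl (out grows on the right; we return the delta and final last)
def pvBGo : Option Char → List Char → List Char × Option Char
  | last, [] => ([], last)
  | last, ch :: rest =>
    let c := PySem.Chars.lowerChar ch
    if PySem.Chars.isalnum c || c = '-' || c = '_' then
      let r := pvBGo (some c) rest; (c :: r.1, r.2)
    else if c = '.' ∧ last ≠ none ∧ last ≠ some '.' then
      let r := pvBGo (some '.') rest; ('.' :: r.1, r.2)
    else pvBGo last rest

theorem pv_foldB : ∀ (l : List Char) (out : List Char) (last : Option Char),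
    l.foldl (fun (st : List Char × Option Char) ch =>
      let c := PySem.Chars.lowerChar ch
      if PySem.Chars.isalnum c || c = '-' || c = '_' then (st.1 ++ [c], some c)
      else if c = '.' ∧ st.2 ≠ none ∧ st.2 ≠ some '.' then (st.1 ++ ['.'], some '.')
      else st) (out, last)
    = (out ++ (pvBGo last l).1, (pvBGo last l).2) := by
  intro l
  induction l with
  | nil => intro out last; simp [pvBGo]
  | cons ch rest ih =>
    intro out last
    simp only [List.foldl_cons, pvBGo]
    by_cases h1 : (PySem.Chars.isalnum (PySem.Chars.lowerChar ch) || PySem.Chars.lowerChar ch = '-' || PySem.Chars.lowerChar ch = '_') = true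
    · simp only [h1, if_true, ih]
      simp
    · simp only [Bool.not_eq_true] at h1
      simp only [h1, Bool.false_eq_true, if_false]
      by_cases h2 : PySem.Chars.lowerChar ch = '.' ∧ last ≠ none ∧ last ≠ some '.'
      · simp only [if_pos h2, ih]
        simp
      · simp only [if_neg h2, ih]

-- map 'no char kept yet' to the 'just saw a dot' collapse state: both refuse a dot and accept anything else
def pvQ : Option Char → Option Char
  | none => some '.'
  | some a => some a

theorem pv_branch1_iff (c : Char) :
    (PySem.Chars.isalnum c || c = '-' || c = '_') = true ↔ (pvValid c = true ∧ c ≠ '.') := by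
  by_cases hdot : c = '.'
  · subst hdot; decide
  · by_cases hdash : c = '-'
    · subst hdash; decide
    · by_cases hund : c = '_'
      · subst hund; decide
      · simp only [pvValid, PySem.Chars.isalnum, hdot, hdash, hund]
        simp [hdot]

theorem pv_bgo_collapse : ∀ (l : List Char) (last : Option Char),
    (pvBGo last l).1 = pvCollapse (pvQ last) ((l.map PySem.Chars.lowerChar).filter pvValid) := by
  intro l
  induction l with
  | nil => intro last; simp [pvBGo, pvCollapse]
  | cons ch rest ih =>
    intro last
    simp only [pvBGo, List.map_cons, List.filter_cons]
    by_cases h1 : (PySem.Chars.isalnum (PySem.Chars.lowerChar ch) || PySem.Chars.lowerChar ch = '-' || PySem.Chars.lowerChar ch = '_') = true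
    · obtain ⟨hv, hd⟩ := (pv_branch1_iff _).mp h1
      rw [if_pos h1, if_pos hv]
      simp only [pvCollapse]
      rw [if_neg (fun hh => hd hh.2)]
      simp only [ih]
      rfl
    · rw [if_neg h1]
      by_cases hd : PySem.Chars.lowerChar ch = '.'
      · have hv : pvValid (PySem.Chars.lowerChar ch) = true := by rw [hd]; decide
        rw [if_pos hv]
        by_cases h2 : last ≠ none ∧ last ≠ some '.'
        · rw [if_pos ⟨hd, h2⟩, hd]
          simp only [pvCollapse]
          rw [if_neg (fun hh => by
                cases last with
                | none => exact h2.1 rfl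
                | some a => exact h2.2 (by simpa [pvQ] using hh.1))]
          simp only [ih]
          rfl
        · have hq : pvQ last = some '.' := by
            rcases not_and_or.mp h2 with h | h
            · rw [not_ne_iff.mp h]; rfl
            · rw [not_ne_iff.mp h]; rfl
          rw [if_neg (fun hh => h2 hh.2), hd]
          simp only [pvCollapse]
          rw [if_pos ⟨hq, trivial⟩]
          exact ih last
      · have hv : pvValid (PySem.Chars.lowerChar ch) = false := by
          rw [← Bool.not_eq_true]
          exact fun hvv => h1 ((pv_branch1_iff _).mpr ⟨hvv, hd⟩)
        rw [if_neg (fun hh => hd hh.1), hv]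
        simp only [Bool.false_eq_true, if_false]
        exact ih last

-- dropping the (single possible) leading dot of the collapse IS starting the collapse in the dot state
theorem pv_collapse_lead (l : List Char) :
    pvCollapse (some '.') l
    = (if (pvCollapse none l).head? = some '.' then (pvCollapse none l).tail else pvCollapse none l) := by
  cases l with
  | nil => simp [pvCollapse]
  | cons c rest =>
    by_cases hc : c = '.'
    · subst hc; simp [pvCollapse]
    · simp [pvCollapse, hc]

-- the two trailing-dot strips (A's slice test, B's pyGet? test) agree on every list
theorem pv_stage4b (l : List Char) :
    (if PySem.List.slice l (some (-1)) none = ['.'] then PySem.List.slice l none (some (-1)) else l)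
    = (if l ≠ [] ∧ PySem.List.pyGet? l (-1) = some '.' then l.dropLast else l) := by
  by_cases hn : l = []
  · subst hn; decide
  · rw [PySem.List.slice_to_neg_one]
    simp only [pv_slice_last, pv_pyGet_neg_one l hn, hn, ne_eq, not_false_eq_true, true_and]

theorem pv_take15_len (l : List Char) (h : 16 ≤ l.length) :
    (PySem.List.slice l none (some 15)).length = 15 := by
  rw [PySem.List.slice_to _ (by norm_num), List.length_take]
  have h15 : ((15:Int)).toNat = 15 := rfl
  rw [h15]
  omega

-- ===== VERDICT (by name: the statement is the Claim_ definition above) =====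
set_option maxHeartbeats 1000000 in
theorem solution_spec : Claim_equal_solution := by
  intro new_id _h
  unfold Spec_solution
  simp only [solution, solution_alt]
  rw [pv_foldRem_self, pv_foldA, pv_foldB]
  simp only [List.getLast?_nil, List.nil_append]
  have hlower : PySem.Chars.lower new_id.toList = new_id.toList.map PySem.Chars.lowerChar := rfl
  rw [hlower, pv_bgo_collapse]
  set L := (new_id.toList.map PySem.Chars.lowerChar).filter pvValid with hL
  -- A's stage 4a equals B's built-in leading-dot skip
  have h4a : (if PySem.List.slice (pvCollapse none L) none (some 1) = ['.']
              then PySem.List.slice (pvCollapse none L) (some 1) none else pvCollapse none L)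
           = pvCollapse (pvQ none) L := by
    show _ = pvCollapse (some '.') L
    rw [pv_collapse_lead]
    simp only [pv_take1, PySem.List.slice_from_one]
  rw [h4a, pv_stage4b]
  set M := (if pvCollapse (pvQ none) L ≠ [] ∧ PySem.List.pyGet? (pvCollapse (pvQ none) L) (-1) = some '.'
            then (pvCollapse (pvQ none) L).dropLast else pvCollapse (pvQ none) L) with hM
  -- stage 5
  have h5 : (if M.length = 0 then M ++ ['a'] else M) = (if M = [] then ['a'] else M) := by
    cases M <;> simp
  rw [h5]
  set T1 := (if M = [] then ['a'] else M) with hT1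
  have hT1ne : T1 ≠ [] := by
    rw [hT1]; split_ifs with h
    · simp
    · exact h
  -- stage 6
  have h6 : (if T1.length ≥ 16 then
        (if PySem.List.slice (PySem.List.slice T1 none (some 15)) (some (-1)) none = ['.']
         then PySem.List.slice (PySem.List.slice T1 none (some 15)) none (some (-1))
         else PySem.List.slice T1 none (some 15))
      else T1)
      = (if 16 ≤ T1.length then
        (if PySem.List.pyGet? (PySem.List.slice T1 none (some 15)) (-1) = some '.'
         then PySem.List.slice (PySem.List.slice T1 none (some 15)) none (some (-1))
         else PySem.List.slice T1 none (some 15))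
      else T1) := by
    simp only [ge_iff_le]
    split_ifs with hlen
    all_goals try rfl
    all_goals
      have ha : PySem.List.slice T1 none (some 15) ≠ [] := by
        intro hh
        have := congrArg List.length hh
        rw [pv_take15_len _ hlen] at this
        simp at this
    · rw [pv_slice_last, pv_pyGet_neg_one _ ha] at *
      tauto
    · rw [pv_slice_last, pv_pyGet_neg_one _ ha] at *
      tauto
  rw [h6]
  set T2 := (if 16 ≤ T1.length then
        (if PySem.List.pyGet? (PySem.List.slice T1 none (some 15)) (-1) = some '.'
         then PySem.List.slice (PySem.List.slice T1 none (some 15)) none (some (-1))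
         else PySem.List.slice T1 none (some 15))
      else T1) with hT2
  have hT2ne : T2 ≠ [] := by
    rw [hT2]; split_ifs with h1 h2
    · rw [PySem.List.slice_to_neg_one]
      intro hh
      have := congrArg List.length hh
      rw [List.length_dropLast, pv_take15_len _ h1] at this
      simp at this
    · intro hh
      have := congrArg List.length hh
      rw [pv_take15_len _ h1] at this
      simp at this
    · exact hT1ne
  -- stage 7
  have hc : T2.getLast? = some (T2.getLast hT2ne) := List.getLast?_eq_some_getLast hT2ne
  rw [pv_while _ _ hc, pv_pyGet_neg_one _ hT2ne, hc]
  simp only [Option.getD_some]
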